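-- pv_equiv track=rewrite | github.com/pablopereira70/algoritmos_faculdade | api_2026/q2_intervalo.py | obter_numeros
-- ===== SOURCE A (Python) =====
-- def obter_numeros(n, m):
--     numeros = ''
--     soma = 0
--
--     for i in range(n, m + 1, +1):
--         if i % 3 == 0:
--             numeros += ' ' + str(i)
--             soma += i
--
--     return numeros, soma
-- ===== SOURCE B (Python) =====
-- def obter_numeros(n, m):
--     first = n + (3 - n % 3) % 3   # least multiple of 3 that is >= n
--     last = m - m % 3              # greatest multiple of 3 that is <= m
--     if last < first:
--         return '', 0
--     count = (last - first) // 3 + 1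
--     numeros = ''.join(' ' + str(x) for x in range(first, last + 1, 3))
--     soma = (first + last) * count // 2
--     return numeros, soma
-- ===== Notes on version B (the rewrite author's own statement) =====
-- stated objective: faster
-- what changed: Instead of scanning every integer in [n,m] and testing i%3==0, B computes the first and last multiples of 3 in the interval arithmetically, enumerates only the multiples with a step-3 range for the string, and gets the sum by the arithmetic-series closed form.
import Mathlib
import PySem

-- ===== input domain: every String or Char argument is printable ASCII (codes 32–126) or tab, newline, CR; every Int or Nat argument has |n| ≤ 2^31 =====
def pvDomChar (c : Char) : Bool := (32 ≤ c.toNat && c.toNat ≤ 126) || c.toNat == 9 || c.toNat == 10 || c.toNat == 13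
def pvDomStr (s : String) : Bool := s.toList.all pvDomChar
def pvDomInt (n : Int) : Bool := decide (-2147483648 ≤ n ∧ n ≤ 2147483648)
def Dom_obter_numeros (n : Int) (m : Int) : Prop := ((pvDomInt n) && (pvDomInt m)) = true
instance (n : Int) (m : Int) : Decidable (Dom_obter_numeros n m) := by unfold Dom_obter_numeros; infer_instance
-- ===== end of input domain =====

-- B replaces A's element-by-element scan of [n,m] by direct arithmetic: the first/last
-- multiples of 3 in the interval, a step-3 range for the string, and the arithmetic-series
-- closed form for the sum (objective: faster).

-- ===== PORT A =====
def obter_numeros (n : Int) (m : Int) : String × Int :=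
  (PySem.List.pyRange n (m + 1) 1).foldl
    (fun (st : String × Int) i =>
      if PySem.Int.mod i 3 == 0 then (st.1 ++ (" " ++ PySem.Int.toStr i), st.2 + i) else st)
    ("", 0)

-- ===== PORT B =====
def obter_numeros_alt (n : Int) (m : Int) : String × Int :=
  let first := n + PySem.Int.mod (3 - PySem.Int.mod n 3) 3
  let last := m - PySem.Int.mod m 3
  if last < first then ("", 0)
  else
    let count := PySem.Int.floordiv (last - first) 3 + 1
    (String.join ((PySem.List.pyRange first (last + 1) 3).map
        (fun x => " " ++ PySem.Int.toStr x)),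
     PySem.Int.floordiv ((first + last) * count) 2)

-- ===== PRECONDITION & SPEC =====
def Spec_obter_numeros (n : Int) (m : Int) (out : String × Int) : Prop := out = obter_numeros_alt n m
instance (n : Int) (m : Int) (out : String × Int) : Decidable (Spec_obter_numeros n m out) := by unfold Spec_obter_numeros; infer_instance

-- ===== CLAIM (what is proved, stated in full; the proofs are below) =====
def Claim_equal_obter_numeros : Prop := ∀ (n : Int) (m : Int), Dom_obter_numeros n m → Spec_obter_numeros n m (obter_numeros n m)

-- ===== LEMMAS AND PROOFS =====

lemma pvJoin_foldl (l : List String) (a : String) :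
    l.foldl (· ++ ·) a = a ++ l.foldl (· ++ ·) "" := by
  induction l generalizing a with
  | nil => simp
  | cons x l ih =>
      simp only [List.foldl_cons]
      rw [ih (a ++ x), ih (("" : String) ++ x)]
      simp [String.append_assoc]

lemma pvJoin_cons (x : String) (l : List String) :
    String.join (x :: l) = x ++ String.join l := by
  simp only [String.join, List.foldl_cons]
  rw [pvJoin_foldl l (("" : String) ++ x)]
  simp

-- A's fold over any list = (joined rendering, sum) of the multiples of 3 in it.
lemma pvFoldl_body (L : List Int) (s : String) (t : Int) :
    L.foldl (fun (st : String × Int) i =>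
        if i % 3 == 0 then (st.1 ++ (" " ++ PySem.Int.toStr i), st.2 + i) else st) (s, t)
      = (s ++ String.join ((L.filter (fun i => i % 3 == 0)).map
            (fun i => " " ++ PySem.Int.toStr i)),
         t + (L.filter (fun i => i % 3 == 0)).sum) := by
  induction L generalizing s t with
  | nil => simp [String.join]
  | cons a L ih =>
      by_cases h : a % 3 = 0
      · simp only [List.foldl_cons, List.filter_cons, h, if_pos, beq_self_eq_true]
        rw [ih]
        simp only [List.map_cons, List.sum_cons, pvJoin_cons, Prod.mk.injEq]
        constructor
        · rw [String.append_assoc]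
        · omega
      · have hb : (a % 3 == 0) = false := by simp [h]
        simp only [List.foldl_cons, List.filter_cons, hb, if_false, Bool.false_eq_true]
        exact ih s t

-- The multiples of 3 inside [f, f+3k] (f a multiple of 3) are exactly f, f+3, …, f+3k.
lemma pvFilter_range (k : Nat) (f : Int) (hf : 3 ∣ f) :
    (PySem.List.pyRange f (f + 3 * k + 1) 1).filter (fun i => i % 3 == 0)
      = (List.range (k + 1)).map (fun j : Nat => f + 3 * (j : Int)) := by
  induction k with
  | zero =>
      have h0 : PySem.List.pyRange f (f + 3 * ((0:Nat):Int) + 1) 1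
          = f :: PySem.List.pyRange (f + 1) (f + 3 * ((0:Nat):Int) + 1) 1 :=
        PySem.List.pyRange_one_cons (by simp)
      rw [h0, PySem.List.pyRange_one_eq_nil (by simp)]
      have hb : (f % 3 == 0) = true := by rw [beq_iff_eq]; omega
      simp [List.filter, hb]
  | succ k ih =>
      have hc : ((k + 1 : Nat) : Int) = (k : Int) + 1 := by push_cast; ring
      rw [hc]
      have hsplit : PySem.List.pyRange f (f + 3 * ((k:Int) + 1) + 1) 1
          = PySem.List.pyRange f (f + 3 * k + 1) 1
            ++ PySem.List.pyRange (f + 3 * k + 1) (f + 3 * ((k:Int) + 1) + 1) 1 :=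
        PySem.List.pyRange_one_append _ _ _ (by omega) (by omega)
      have htail : PySem.List.pyRange (f + 3 * (k:Int) + 1) (f + 3 * ((k:Int) + 1) + 1) 1
          = [f + 3 * k + 1, f + 3 * k + 2, f + 3 * k + 3] := by
        rw [PySem.List.pyRange_one_cons (by omega), PySem.List.pyRange_one_cons (by omega),
            PySem.List.pyRange_one_cons (by omega), PySem.List.pyRange_one_eq_nil (by omega)]
        simp only [List.cons.injEq, and_true]
        exact ⟨trivial, by omega, by omega⟩
      rw [hsplit, List.filter_append, ih, htail]
      have h1 : ((f + 3 * (k:Int) + 1) % 3 == 0) = false := by rw [beq_eq_false_iff_ne]; omega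
      have h2 : ((f + 3 * (k:Int) + 2) % 3 == 0) = false := by rw [beq_eq_false_iff_ne]; omega
      have h3 : ((f + 3 * (k:Int) + 3) % 3 == 0) = true := by rw [beq_iff_eq]; omega
      conv_rhs => rw [List.range_succ, List.map_append]
      simp only [List.filter, h1, h2, h3, List.map_cons, List.map_nil, List.cons.injEq, and_true, List.append_cancel_left_eq]
      push_cast
      ring

-- Twice the sum of f, f+3, …, f+3k.
lemma pvTwo_sum (k : Nat) (f : Int) :
    2 * (((List.range (k + 1)).map (fun j : Nat => f + 3 * (j : Int))).sum)
      = (2 * f + 3 * k) * (k + 1) := by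
  induction k with
  | zero => simp
  | succ k ih =>
      rw [List.range_succ, List.map_append, List.sum_append]
      simp only [List.map_cons, List.map_nil, List.sum_cons, List.sum_nil]
      push_cast
      push_cast at ih
      nlinarith [ih]

-- ===== VERDICT (by name: the statement is the Claim_ definition above) =====
theorem obter_numeros_spec : Claim_equal_obter_numeros := by
  intro n m _
  unfold Spec_obter_numeros obter_numeros obter_numeros_alt
  have h3 : (0:Int) < 3 := by norm_num
  have h2 : (0:Int) < 2 := by norm_num
  simp only [PySem.Int.mod_eq_emod_of_pos h3, PySem.Int.floordiv_eq_ediv_of_pos h3,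
    PySem.Int.floordiv_eq_ediv_of_pos h2]
  set first : Int := n + (3 - n % 3) % 3 with hfirst
  set last : Int := m - m % 3 with hlast
  have hffirst : (3:Int) ∣ first := by omega
  have hnfirst : n ≤ first := by omega
  have hlastm : last ≤ m := by omega
  rw [pvFoldl_body]
  by_cases hle : last < first
  · -- no multiple of 3 in [n, m]
    have hnil : (PySem.List.pyRange n (m + 1) 1).filter (fun i => i % 3 == 0) = [] := by
      rw [List.filter_eq_nil_iff]
      intro x hx
      rw [PySem.List.mem_pyRange_one] at hx
      simp only [beq_iff_eq]
      omega
    rw [hnil, if_pos hle]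
    simp [String.join]
  · push Not at hle
    set k : Nat := ((last - first) / 3).toNat with hk
    have hlk : last = first + 3 * k := by
      have hdvd : (3:Int) ∣ last - first := by omega
      omega
    have hsplit1 : PySem.List.pyRange n (m + 1) 1
        = PySem.List.pyRange n first 1 ++ PySem.List.pyRange first (m + 1) 1 :=
      PySem.List.pyRange_one_append _ _ _ hnfirst (by omega)
    have hsplit2 : PySem.List.pyRange first (m + 1) 1
        = PySem.List.pyRange first (last + 1) 1 ++ PySem.List.pyRange (last + 1) (m + 1) 1 :=
      PySem.List.pyRange_one_append _ _ _ (by omega) (by omega)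
    have hpre : (PySem.List.pyRange n first 1).filter (fun i => i % 3 == 0) = [] := by
      rw [List.filter_eq_nil_iff]
      intro x hx
      rw [PySem.List.mem_pyRange_one] at hx
      simp only [beq_iff_eq]
      omega
    have hpost : (PySem.List.pyRange (last + 1) (m + 1) 1).filter (fun i => i % 3 == 0) = [] := by
      rw [List.filter_eq_nil_iff]
      intro x hx
      rw [PySem.List.mem_pyRange_one] at hx
      simp only [beq_iff_eq]
      omega
    have hmid : (PySem.List.pyRange first (last + 1) 1).filter (fun i => i % 3 == 0)
        = (List.range (k + 1)).map (fun j : Nat => first + 3 * (j : Int)) := by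
      have h := pvFilter_range k first hffirst
      rw [← hlk] at h
      exact h
    have hfilter : (PySem.List.pyRange n (m + 1) 1).filter (fun i => i % 3 == 0)
        = (List.range (k + 1)).map (fun j : Nat => first + 3 * (j : Int)) := by
      rw [hsplit1, List.filter_append, hsplit2, List.filter_append, hpre, hpost, hmid]
      simp
    have hcount : (last - first) / 3 = (k : Int) := by
      have hdvd : (3:Int) ∣ last - first := by omega
      omega
    have hrange3 : PySem.List.pyRange first (last + 1) 3
        = (List.range (k + 1)).map (fun j : Nat => first + 3 * (j : Int)) := by
      rw [PySem.List.pyRange_of_pos _ _ h3]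
      have hif : (if first < last + 1 then ((last + 1 - first + 3 - 1) / 3).toNat else 0) = k + 1 := by
        rw [if_pos (by omega)]
        omega
      rw [hif]
    rw [hfilter, if_neg (by omega), hrange3, hcount]
    refine Prod.ext ?_ ?_
    · simp
    · have h2s := pvTwo_sum k first
      have heq : (first + last) * ((k:Int) + 1)
          = 2 * (((List.range (k + 1)).map (fun j : Nat => first + 3 * (j : Int))).sum) := by
        rw [h2s, hlk]; ring
      simp only [heq]
      rw [Int.mul_ediv_cancel_left _ (by norm_num)]
      simp
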